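-- pv_equiv track=rewrite | github.com/min1907/python_learning | DSA/12. Codility_Euclidean Algorithm/Codility_ChocolatesByNumbers.py | solution
-- ===== SOURCE A (Python) =====
-- def solution(N, M):  # O(N+M) --> 62%
--     if N == 1:
--         return 1
--     result = 1
--     remander = (0 + M) % N
--
--     while remander != 0:
--         remander = (remander + M) % N
--         result += 1
--     return result
-- ===== SOURCE B (Python) =====
-- def solution(N, M):
--     # Euclid's algorithm: answer is |N| // gcd(N, M), O(log min(N,M))
--     a = abs(N)
--     b = abs(M)
--     while b:
--         a, b = b, a % b
--     return abs(N) // a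
-- ===== Notes on version B (the rewrite author's own statement) =====
-- stated objective: faster
-- what changed: Replaced the O(N) step-by-step simulation of eating chocolates with Euclid's gcd algorithm and a single division |N| // gcd(N, M).
import Mathlib
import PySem

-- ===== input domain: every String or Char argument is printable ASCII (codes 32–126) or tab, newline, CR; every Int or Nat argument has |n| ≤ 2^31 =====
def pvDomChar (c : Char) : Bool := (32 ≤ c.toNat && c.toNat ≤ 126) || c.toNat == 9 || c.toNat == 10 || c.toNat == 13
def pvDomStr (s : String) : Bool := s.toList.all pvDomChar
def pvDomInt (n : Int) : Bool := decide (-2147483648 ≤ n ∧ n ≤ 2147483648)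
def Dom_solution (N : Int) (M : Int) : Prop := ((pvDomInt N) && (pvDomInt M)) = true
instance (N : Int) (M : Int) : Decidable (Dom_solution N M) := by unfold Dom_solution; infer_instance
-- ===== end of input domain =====

-- B replaces A's eating simulation by Euclid's gcd algorithm and one division (asymptotically faster).

-- ===== PORT A =====
-- while remander != 0: remander = (remander + M) % N; result += 1
-- (fuel N.natAbs is a termination guard only: for N ≠ 0 the loop ends within |N| - 1 iterations)
def solutionLoop (N M : Int) : Nat → Int → Int → Int
  | 0, _, result => result
  | fuel + 1, remander, result =>
      if remander = 0 then result
      else solutionLoop N M fuel (PySem.Int.mod (remander + M) N) (result + 1)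

def solution (N : Int) (M : Int) : Int :=
  if N = 1 then 1
  else solutionLoop N M N.natAbs (PySem.Int.mod (0 + M) N) 1

-- ===== PORT B =====
-- a, b = abs(N), abs(M); while b: a, b = b, a % b; return abs(N) // a
-- (the values are nonnegative, so Nat mod/div are exact for Python's % and // here;
--  fuel b + 1 is a termination guard only: b strictly decreases each iteration)
def gcdLoop : Nat → Nat → Nat → Nat
  | 0, a, _ => a
  | fuel + 1, a, b => if b = 0 then a else gcdLoop fuel b (a % b)

def solution_alt (N : Int) (M : Int) : Int :=
  ((N.natAbs / gcdLoop (M.natAbs + 1) N.natAbs M.natAbs : Nat) : Int)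

-- ===== PRECONDITION & SPEC =====
-- A raises ZeroDivisionError (the initial M % N) exactly when N = 0; Pre_ excludes only that.
def Pre_solution (N : Int) (M : Int) : Prop := N ≠ 0
instance (N : Int) (M : Int) : Decidable (Pre_solution N M) := by unfold Pre_solution; infer_instance
def pvWitness_solution : Int × Int := (10, 4)

def Spec_solution (N : Int) (M : Int) (out : Int) : Prop := out = solution_alt N M
instance (N : Int) (M : Int) (out : Int) : Decidable (Spec_solution N M out) := by unfold Spec_solution; infer_instance

-- ===== CLAIM (what is proved, stated in full; the proofs are below) =====
def Claim_equal_solution : Prop := ∀ (N : Int) (M : Int), Dom_solution N M → Pre_solution N M → Spec_solution N M (solution N M)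

-- ===== LEMMAS AND PROOFS =====

theorem pymod_dvd_sub (a N : Int) : N ∣ a - PySem.Int.mod a N :=
  ⟨PySem.Int.floordiv a N, by have := PySem.Int.floordiv_mul_add_mod a N; linarith⟩

-- Python mod is determined by congruence mod N plus the divisor-sign range.
theorem pymod_unique (N a r : Int) (hN : N ≠ 0) (hcong : N ∣ a - r)
    (hpos : 0 < N → 0 ≤ r ∧ r < N) (hneg : N < 0 → N < r ∧ r ≤ 0) :
    PySem.Int.mod a N = r := by
  have hd : N ∣ PySem.Int.mod a N - r := by
    have h := dvd_sub hcong (pymod_dvd_sub a N)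
    have he : (a - r) - (a - PySem.Int.mod a N) = PySem.Int.mod a N - r := by ring
    rwa [he] at h
  have habs : |N| ∣ PySem.Int.mod a N - r := (abs_dvd _ _).mpr hd
  have hz : PySem.Int.mod a N - r = 0 := by
    apply Int.eq_zero_of_abs_lt_dvd habs
    rcases lt_or_gt_of_ne hN with hneg' | hpos'
    · have b1 := PySem.Int.mod_neg_bounds a hneg'
      have b2 := hneg hneg'
      rw [abs_of_neg hneg'] at *
      rw [abs_lt]; omega
    · have b1 := PySem.Int.mod_nonneg a hpos'
      have b2 := PySem.Int.mod_lt a hpos'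
      have b3 := hpos hpos'
      rw [abs_of_pos hpos'] at *
      rw [abs_lt]; omega
  omega

theorem pymod_congr (N a b : Int) (hN : N ≠ 0) (h : N ∣ a - b) :
    PySem.Int.mod a N = PySem.Int.mod b N := by
  apply pymod_unique N a _ hN
  · have h2 := pymod_dvd_sub b N
    have he : (a - b) + (b - PySem.Int.mod b N) = a - PySem.Int.mod b N := by ring
    have := dvd_add h h2
    rwa [he] at this
  · intro hp; exact ⟨PySem.Int.mod_nonneg b hp, PySem.Int.mod_lt b hp⟩
  · intro hn; exact PySem.Int.mod_neg_bounds b hn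

-- A's loop starting at the j-th step returns the least k ≥ 1 with N ∣ k*M.
theorem solutionLoop_eq (N M : Int) (hN : N ≠ 0) (k : Nat)
    (hk : N ∣ (k : Int) * M) (hmin : ∀ j : Nat, 1 ≤ j → j < k → ¬ N ∣ (j : Int) * M) :
    ∀ fuel j : Nat, 1 ≤ j → j ≤ k → k ≤ j + fuel →
      solutionLoop N M fuel (PySem.Int.mod ((j : Int) * M) N) (j : Int) = (k : Int) := by
  intro fuel
  induction fuel with
  | zero =>
      intro j hj1 hjk hkj
      have : j = k := by omega
      simp [solutionLoop, this]
  | succ f ih =>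
      intro j hj1 hjk hkj
      by_cases h0 : PySem.Int.mod ((j : Int) * M) N = 0
      · have hdvd : N ∣ (j : Int) * M := (PySem.Int.mod_eq_zero_iff_dvd _ _).mp h0
        have hjeq : j = k := by
          by_contra hne
          exact hmin j hj1 (lt_of_le_of_ne hjk hne) hdvd
        subst hjeq
        simp [solutionLoop, h0]
      · have hjk' : j < k := by
          rcases lt_or_eq_of_le hjk with h | h
          · exact h
          · exact absurd ((PySem.Int.mod_eq_zero_iff_dvd _ _).mpr (h ▸ hk)) h0
        have hstep : PySem.Int.mod (PySem.Int.mod ((j : Int) * M) N + M) N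
            = PySem.Int.mod (((j + 1 : Nat) : Int) * M) N := by
          apply pymod_congr N _ _ hN
          have h2 := pymod_dvd_sub ((j : Int) * M) N
          have he : -((j : Int) * M - PySem.Int.mod ((j : Int) * M) N)
              = (PySem.Int.mod ((j : Int) * M) N + M) - ((j + 1 : Nat) : Int) * M := by
            push_cast; ring
          have := h2.neg_right
          rwa [he] at this
        have hrec := ih (j + 1) (by omega) (by omega) (by omega)
        rw [solutionLoop.eq_def]
        simp only [if_neg h0]
        rw [hstep]
        push_cast at hrec ⊢
        exact hrec

theorem gcdLoop_eq : ∀ fuel a b : Nat, b < fuel → gcdLoop fuel a b = Nat.gcd b a := by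
  intro fuel
  induction fuel with
  | zero => intro a b h; omega
  | succ f ih =>
      intro a b h
      by_cases hb : b = 0
      · simp [gcdLoop, hb]
      · have hlt : a % b < f := lt_of_lt_of_le (Nat.mod_lt a (Nat.pos_of_ne_zero hb)) (by omega)
        rw [gcdLoop, if_neg hb, ih b (a % b) hlt]
        exact (Nat.gcd_rec b a).symm

theorem pv_main (N M : Int) (hN : N ≠ 0) :
    solution N M = ((N.natAbs / Nat.gcd N.natAbs M.natAbs : Nat) : Int) := by
  have hn : 0 < N.natAbs := Int.natAbs_pos.mpr hN
  have hg : 0 < Nat.gcd N.natAbs M.natAbs := Nat.gcd_pos_of_pos_left _ hn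
  have hgn : Nat.gcd N.natAbs M.natAbs ∣ N.natAbs := Nat.gcd_dvd_left _ _
  have hgm : Nat.gcd N.natAbs M.natAbs ∣ M.natAbs := Nat.gcd_dvd_right _ _
  have hk1 : 1 ≤ N.natAbs / Nat.gcd N.natAbs M.natAbs :=
    (Nat.one_le_div_iff hg).mpr (Nat.le_of_dvd hn hgn)
  have hkn : N.natAbs / Nat.gcd N.natAbs M.natAbs ≤ N.natAbs := Nat.div_le_self _ _
  have bridge : ∀ j : Nat, (N ∣ (j : Int) * M) ↔ N.natAbs ∣ j * M.natAbs := by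
    intro j
    rw [← Int.natAbs_dvd, Int.natCast_dvd, Int.natAbs_mul, Int.natAbs_natCast]
  have h1 : Nat.gcd N.natAbs M.natAbs * (N.natAbs / Nat.gcd N.natAbs M.natAbs) = N.natAbs :=
    Nat.mul_div_cancel' hgn
  have h2 : Nat.gcd N.natAbs M.natAbs * (M.natAbs / Nat.gcd N.natAbs M.natAbs) = M.natAbs :=
    Nat.mul_div_cancel' hgm
  have hkdvd : N ∣ ((N.natAbs / Nat.gcd N.natAbs M.natAbs : Nat) : Int) * M := by
    rw [bridge]
    refine ⟨M.natAbs / Nat.gcd N.natAbs M.natAbs, ?_⟩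
    calc N.natAbs / Nat.gcd N.natAbs M.natAbs * M.natAbs
        = N.natAbs / Nat.gcd N.natAbs M.natAbs
            * (Nat.gcd N.natAbs M.natAbs * (M.natAbs / Nat.gcd N.natAbs M.natAbs)) := by rw [h2]
      _ = Nat.gcd N.natAbs M.natAbs * (N.natAbs / Nat.gcd N.natAbs M.natAbs)
            * (M.natAbs / Nat.gcd N.natAbs M.natAbs) := by ring
      _ = N.natAbs * (M.natAbs / Nat.gcd N.natAbs M.natAbs) := by rw [h1]
  have hmin : ∀ j : Nat, 1 ≤ j → j < N.natAbs / Nat.gcd N.natAbs M.natAbs →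
      ¬ N ∣ (j : Int) * M := by
    intro j hj1 hjk hdvd
    rw [bridge] at hdvd
    have hcop : Nat.Coprime (N.natAbs / Nat.gcd N.natAbs M.natAbs)
        (M.natAbs / Nat.gcd N.natAbs M.natAbs) := Nat.coprime_div_gcd_div_gcd hg
    have hdvd' : Nat.gcd N.natAbs M.natAbs * (N.natAbs / Nat.gcd N.natAbs M.natAbs)
        ∣ Nat.gcd N.natAbs M.natAbs * (j * (M.natAbs / Nat.gcd N.natAbs M.natAbs)) := by
      rw [h1]
      have he : j * M.natAbs
          = Nat.gcd N.natAbs M.natAbs * (j * (M.natAbs / Nat.gcd N.natAbs M.natAbs)) := by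
        calc j * M.natAbs
            = j * (Nat.gcd N.natAbs M.natAbs * (M.natAbs / Nat.gcd N.natAbs M.natAbs)) := by
              rw [h2]
          _ = Nat.gcd N.natAbs M.natAbs * (j * (M.natAbs / Nat.gcd N.natAbs M.natAbs)) := by ring
      rwa [he] at hdvd
    have hkjm := (Nat.mul_dvd_mul_iff_left hg).mp hdvd'
    have hkj := hcop.dvd_of_dvd_mul_right hkjm
    have := Nat.le_of_dvd (by omega) hkj
    omega
  by_cases h1' : N = 1
  · have hone : N.natAbs = 1 := by rw [h1']; rfl
    simp [solution, h1', Nat.gcd_one_left]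
  · rw [solution, if_neg h1']
    have hz : (0 : Int) + M = ((1 : Nat) : Int) * M := by push_cast; ring
    rw [hz]
    exact_mod_cast solutionLoop_eq N M hN (N.natAbs / Nat.gcd N.natAbs M.natAbs) hkdvd hmin
      N.natAbs 1 (by omega) hk1 (by omega)

-- ===== VERDICT (by name: the statement is the Claim_ definition above) =====
theorem solution_spec : Claim_equal_solution := by
  intro N M _ hpre
  unfold Spec_solution solution_alt
  rw [pv_main N M hpre, gcdLoop_eq (M.natAbs + 1) N.natAbs M.natAbs (by omega), Nat.gcd_comm]
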